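-- pv_equiv track=rewrite | github.com/Apgoldberg1/primecity | primetests.py | pierpont1
-- ===== SOURCE A (Python) =====
-- import math
--
-- def prime(number):
--     #checks if number has only factors of 1 and itself
--     factors = []
--     factorsum = 0
--     for i in range(math.floor(number / 2)):
--         if number % (i + 1) == 0:
--             factors.append(i + 1)
--     for l in range(len(factors)):
--         factorsum += factors[l]
--     if factorsum == 1:
--         return True
--     else:
--         return False
--
-- def factor(n):
--   #returns prime factorization in a list
--       i = 2
--       factors = []
--       while i * i <= n:
--           if n % i:
--               i += 1
--           else:
--               n //= i
--               factors.append(i)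
--       if n > 1:
--           factors.append(n)
--       return factors
--
-- def pierpont1(number):
--   if prime(number):
--     primelist = factor(number-1)
--     for i in primelist:
--       if i != 2 and i !=3:
--         return False
--     return True
--   else:
--     return False
-- ===== SOURCE B (Python) =====
-- def pierpont1(number):
--     # O(sqrt(n)) trial-division primality, then divide out 2s and 3s from number-1.
--     if number < 2:
--         return False
--     i = 2
--     while i * i <= number:
--         if number % i == 0:
--             return False
--         i += 1
--     m = number - 1
--     for p in (2, 3):
--         while m > 1 and m % p == 0:
--             m //= p
--     return m == 1
-- ===== Notes on version B (the rewrite author's own statement) =====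
-- stated objective: faster
-- what changed: Replaced the O(n) all-divisors sum primality test by O(sqrt(n)) trial division, and the full prime factorization of number-1 by directly dividing out factors 2 and 3.
import Mathlib
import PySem

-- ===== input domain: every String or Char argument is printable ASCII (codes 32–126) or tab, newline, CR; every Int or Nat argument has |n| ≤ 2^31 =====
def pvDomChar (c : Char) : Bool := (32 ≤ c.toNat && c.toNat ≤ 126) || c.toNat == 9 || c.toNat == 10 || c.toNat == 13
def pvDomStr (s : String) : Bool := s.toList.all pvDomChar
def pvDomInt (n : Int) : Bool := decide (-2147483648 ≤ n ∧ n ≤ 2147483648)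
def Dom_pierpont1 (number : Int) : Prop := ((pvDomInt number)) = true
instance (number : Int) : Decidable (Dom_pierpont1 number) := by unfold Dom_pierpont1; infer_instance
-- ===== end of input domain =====

-- B replaces A's O(n) sum-of-all-divisors primality test by trial division up to sqrt(n)
-- and A's full prime factorization of number-1 by dividing out the factors 2 and 3 directly.
-- The Nat fuel arguments below only make the Python while-loops total (fuel is always sufficient).

-- ===== PORT A =====

-- helper `prime(number)`: collects all divisors in [1, floor(number/2)] (first loop),
-- sums them by index (second loop), tests sum == 1
def pvFactorsA (number : Int) : List Int :=
  (PySem.List.pyRange 0 (PySem.Int.floordiv number 2)).foldl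
    (fun acc i => if PySem.Int.mod number (i + 1) == 0 then acc ++ [i + 1] else acc) []

def pvFactorSum (factors : List Int) : Int :=
  (PySem.List.pyRange 0 (PySem.List.len factors)).foldl
    (fun s l => s + PySem.List.pyGetD factors l 0) 0

def pvPrimeA (number : Int) : Bool := pvFactorSum (pvFactorsA number) == 1

-- helper `factor(n)`: the while loop over state (i, n, factors)
def pvFactorLoop : Nat → Int → Int → List Int → Int × List Int
  | 0, _, n, acc => (n, acc)
  | fuel + 1, i, n, acc =>
    if i * i ≤ n then
      if ¬ (PySem.Int.mod n i = 0) then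
        pvFactorLoop fuel (i + 1) n acc
      else
        pvFactorLoop fuel i (PySem.Int.floordiv n i) (acc ++ [i])
    else (n, acc)

def pvFactor (n : Int) : List Int :=
  let r := pvFactorLoop ((n - 1).toNat + n.toNat + 1) 2 n []
  if 1 < r.1 then r.2 ++ [r.1] else r.2

def pierpont1 (number : Int) : Bool :=
  if pvPrimeA number then
    (pvFactor (number - 1)).all (fun i => i == 2 || i == 3)
  else false

-- ===== PORT B =====

-- trial-division loop: `while i * i <= number: if number % i == 0: return False; i += 1`
def pvIsPrimeLoop : Nat → Int → Int → Bool
  | 0, _, _ => true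
  | fuel + 1, number, i =>
    if i * i ≤ number then
      if PySem.Int.mod number i == 0 then false
      else pvIsPrimeLoop fuel number (i + 1)
    else true

-- `while m > 1 and m % p == 0: m //= p`
def pvStrip : Nat → Int → Int → Int
  | 0, _, m => m
  | fuel + 1, p, m =>
    if 1 < m ∧ PySem.Int.mod m p = 0 then
      pvStrip fuel p (PySem.Int.floordiv m p)
    else m

def pierpont1_alt (number : Int) : Bool :=
  if number < 2 then false
  else if pvIsPrimeLoop ((number - 1).toNat + 1) number 2 then
    pvStrip ((number - 1).toNat + 1) 3
      (pvStrip ((number - 1).toNat + 1) 2 (number - 1)) == 1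
  else false

-- ===== PRECONDITION & SPEC =====
def Spec_pierpont1 (number : Int) (out : Bool) : Prop := out = pierpont1_alt number
instance (number : Int) (out : Bool) : Decidable (Spec_pierpont1 number out) := by unfold Spec_pierpont1; infer_instance

-- ===== CLAIM (what is proved, stated in full; the proofs are below) =====
def Claim_equal_pierpont1 : Prop := ∀ (number : Int), Dom_pierpont1 number → Spec_pierpont1 number (pierpont1 number)

-- ===== LEMMAS AND PROOFS =====

-- n is 3-smooth
def pvSmooth (n : Int) : Prop := ∃ a b : ℕ, n = 2^a * 3^b

theorem pvSmooth_toNat {n : Int} {x y : ℕ} (he : n = 2^x * 3^y) : n.toNat = 2^x * 3^y := by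
  have h : ((2^x * 3^y : ℕ) : ℤ) = n := by rw [he]; push_cast; ring
  rw [← h, Int.toNat_natCast]

theorem pvPrime23 {p a b : ℕ} (hp : p.Prime) (h : p ∣ 2^a * 3^b) : p = 2 ∨ p = 3 := by
  rcases (Nat.Prime.dvd_mul hp).1 h with h' | h'
  · exact Or.inl ((Nat.prime_dvd_prime_iff_eq hp Nat.prime_two).1 (hp.dvd_of_dvd_pow h'))
  · exact Or.inr ((Nat.prime_dvd_prime_iff_eq hp Nat.prime_three).1 (hp.dvd_of_dvd_pow h'))

theorem pvSmallFactor {m a b : ℕ} (h2 : 2 ≤ m) (he : m = 2^a * 3^b) :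
    ∃ p : ℕ, (p = 2 ∨ p = 3) ∧ p ∣ m := by
  have hp := Nat.minFac_prime (by omega : m ≠ 1)
  have hdm : m.minFac ∣ 2 ^ a * 3 ^ b := by rw [← he]; exact Nat.minFac_dvd m
  exact ⟨m.minFac, pvPrime23 hp hdm, Nat.minFac_dvd m⟩

theorem pvCoprimeOne {r x y : ℕ} (hd : r ∣ 2^x * 3^y) (h2 : ¬ 2 ∣ r) (h3 : ¬ 3 ∣ r) : r = 1 := by
  have c2 : Nat.Coprime r 2 := Nat.coprime_comm.mp ((Nat.Prime.coprime_iff_not_dvd Nat.prime_two).2 h2)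
  have c3 : Nat.Coprime r 3 := Nat.coprime_comm.mp ((Nat.Prime.coprime_iff_not_dvd Nat.prime_three).2 h3)
  exact Nat.Coprime.eq_one_of_dvd (Nat.Coprime.mul_right (c2.pow_right x) (c3.pow_right y)) hd

-- exact division by a divisor 2 ≤ p of 1 < m
theorem pvDivFacts (p m : Int) (hp : 2 ≤ p) (h1 : 1 < m) (hd : p ∣ m) :
    p * (m / p) = m ∧ 1 ≤ m / p ∧ m / p < m := by
  have hmul : p * (m / p) = m := Int.mul_ediv_cancel' hd
  have hq1 : 1 ≤ m / p := by
    by_contra hq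
    have : p * (m / p) ≤ p * 0 := mul_le_mul_of_nonneg_left (by omega) (by omega)
    omega
  have hqlt : m / p < m := by
    have : 2 * (m / p) ≤ p * (m / p) := mul_le_mul_of_nonneg_right hp (by omega)
    omega
  exact ⟨hmul, hq1, hqlt⟩

-- ---- B's primality loop returns true iff no divisor d ≥ i with d*d ≤ number ----
theorem pvTrial_iff : ∀ (f : ℕ) (number i : Int), 2 ≤ i → (number + 1 - i).toNat < f →
    (pvIsPrimeLoop f number i = true ↔ ∀ d : Int, i ≤ d → d * d ≤ number → ¬ d ∣ number) := by
  intro f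
  induction f with
  | zero => intro number i _ hf; omega
  | succ f IH =>
    intro number i hi hf
    simp only [pvIsPrimeLoop]
    split_ifs with h1 h2
    · constructor
      · intro hF; exact absurd hF (by simp)
      · intro hall
        have hd : i ∣ number := (PySem.Int.mod_eq_zero_iff_dvd number i).1 (by simpa using h2)
        exact ((hall i le_rfl h1) hd).elim
    · have h2i : 2 * i ≤ i * i := mul_le_mul_of_nonneg_right hi (by omega)
      have hnd : ¬ i ∣ number := fun hh => h2 (by simp [(PySem.Int.mod_eq_zero_iff_dvd number i).2 hh])
      rw [IH number (i + 1) (by omega) (by omega)]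
      constructor
      · intro hall d hd hdd hdvd
        rcases eq_or_lt_of_le hd with rfl | hlt
        · exact hnd hdvd
        · exact hall d (by omega) hdd hdvd
      · intro hall d hd hdd; exact hall d (by omega) hdd
    · constructor
      · intro _ d hd hdd _
        have : i * i ≤ d * d := mul_le_mul hd hd (by omega) (by omega)
        omega
      · intro _; rfl

-- ---- A's prime(): sum of divisors in [1, number//2] equals 1 ----
theorem pvSumZeroIffNil (l : List ℤ) (h : ∀ x ∈ l, 2 ≤ x) : l.sum = 0 ↔ l = [] := by
  cases l with
  | nil => simp
  | cons y t =>
    have h1 := h y List.mem_cons_self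
    have h2 : 0 ≤ t.sum := List.sum_nonneg (fun x hx => by
      have := h x (List.mem_cons_of_mem _ hx); omega)
    simp only [List.sum_cons]
    exact ⟨fun he => absurd he (by omega), fun he => by simp at he⟩

theorem pvFactorSum_eq (l : List Int) : pvFactorSum l = l.sum := by
  unfold pvFactorSum
  rw [PySem.List.foldl_pyRange_pyGetD l 0 (fun s x => s + x) 0 le_rfl]
  simp only [Int.toNat_zero, List.drop_zero]
  rw [PySem.List.foldl_add (g := fun x => x)]
  simp

theorem pvPrimeA_false {number : Int} (h : number < 2) : pvPrimeA number = false := by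
  have hnil : pvFactorsA number = [] := by
    unfold pvFactorsA
    rw [PySem.Int.floordiv_eq_ediv_of_pos (show (0:ℤ) < 2 by norm_num),
      PySem.List.pyRange_one_eq_nil (show number / 2 ≤ 0 by omega)]
    rfl
  unfold pvPrimeA
  rw [hnil, pvFactorSum_eq]
  decide

theorem pvPrimeA_iff (number : Int) (h2 : 2 ≤ number) :
    pvPrimeA number = true ↔ ∀ d : Int, 2 ≤ d → d ≤ number / 2 → ¬ d ∣ number := by
  have hE : PySem.Int.floordiv number 2 = number / 2 :=
    PySem.Int.floordiv_eq_ediv_of_pos (by norm_num)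
  have hk1 : 1 ≤ number / 2 := by omega
  have h01 : (PySem.Int.mod number (0 + 1) == 0) = true := by
    simp
  have hfac : pvFactorsA number =
      1 :: (((PySem.List.pyRange 1 (number / 2)).filter
        (fun i => PySem.Int.mod number (i + 1) == 0)).map (fun i => i + 1)) := by
    unfold pvFactorsA
    rw [PySem.List.foldl_append_if, hE,
      PySem.List.pyRange_one_cons (by omega : (0:ℤ) < number / 2)]
    simp only [List.nil_append, List.filter_cons, h01, if_true, List.map_cons]
    norm_num
  unfold pvPrimeA
  rw [hfac, pvFactorSum_eq]
  set rest := (((PySem.List.pyRange 1 (number / 2)).filter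
      (fun i => PySem.Int.mod number (i + 1) == 0)).map (fun i => i + 1)) with hrest
  have hrest2 : ∀ x ∈ rest, 2 ≤ x := by
    intro x hx
    rw [hrest] at hx
    obtain ⟨i, hi, rfl⟩ := List.mem_map.1 hx
    have := (PySem.List.mem_pyRange_one.1 (List.mem_filter.1 hi).1).1
    omega
  simp only [List.sum_cons, beq_iff_eq]
  constructor
  · intro hs d hd hdk hdvd
    have hr0 : rest.sum = 0 := by omega
    have hnil := (pvSumZeroIffNil rest hrest2).1 hr0
    have hmem : d ∈ rest := by
      rw [hrest]
      refine List.mem_map.2 ⟨d - 1,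
        List.mem_filter.2 ⟨PySem.List.mem_pyRange_one.2 ⟨by omega, by omega⟩, ?_⟩, by ring⟩
      simp only [beq_iff_eq]
      rw [show d - 1 + 1 = d by ring, PySem.Int.mod_eq_zero_iff_dvd]
      exact hdvd
    rw [hnil] at hmem
    simp at hmem
  · intro hall
    have hnil : rest = [] := by
      rw [hrest]
      simp only [List.map_eq_nil_iff, List.filter_eq_nil_iff]
      intro i hi hcond
      have hmem := PySem.List.mem_pyRange_one.1 hi
      have hdvd : (i + 1) ∣ number := by
        rw [← PySem.Int.mod_eq_zero_iff_dvd]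
        simpa using hcond
      exact hall (i + 1) (by omega) (by omega) hdvd
    rw [hnil]
    simp

-- ---- the two divisor criteria agree for number ≥ 2 ----
theorem pvBridge (number : Int) (h2 : 2 ≤ number) :
    (∀ d : Int, 2 ≤ d → d ≤ number / 2 → ¬ d ∣ number) ↔
    (∀ d : Int, 2 ≤ d → d * d ≤ number → ¬ d ∣ number) := by
  constructor
  · intro h d hd hdd hdvd
    refine h d hd ?_ hdvd
    rw [Int.le_ediv_iff_mul_le (by norm_num : (0:ℤ) < 2)]
    nlinarith
  · intro h d hd hdk hdvd
    rw [Int.le_ediv_iff_mul_le (by norm_num : (0:ℤ) < 2)] at hdk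
    set e := number / d with he
    have hmul : d * e = number := Int.mul_ediv_cancel' hdvd
    have he2 : 2 ≤ e := by
      by_contra hc
      have : d * e ≤ d * 1 := mul_le_mul_of_nonneg_left (by omega) (by omega)
      omega
    have hedvd : e ∣ number := ⟨d, by rw [← hmul]; ring⟩
    by_cases hc : d * d ≤ number
    · exact h d hd hc hdvd
    · have hc' : number < d * d := by omega
      have hed : e < d := by nlinarith
      have hee : e * e ≤ number := by nlinarith
      exact h e he2 hee hedvd

theorem pvPrimeEq (number : Int) (h2 : 2 ≤ number) :
    pvPrimeA number = pvIsPrimeLoop ((number - 1).toNat + 1) number 2 := by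
  rw [Bool.eq_iff_iff, pvPrimeA_iff number h2, pvBridge number h2,
    pvTrial_iff ((number - 1).toNat + 1) number 2 le_rfl (by omega)]

-- ---- pvStrip divides out the exact power of p ----
theorem pvStrip_spec : ∀ (f : ℕ) (p : Int), 2 ≤ p → ∀ (m : Int), m.toNat < f → 1 ≤ m →
    ∃ a : ℕ, m = p ^ a * pvStrip f p m ∧ 1 ≤ pvStrip f p m ∧
      (pvStrip f p m = 1 ∨ ¬ p ∣ pvStrip f p m) := by
  intro f
  induction f with
  | zero => intro p _ m hf; omega
  | succ f IH =>
    intro p hp m hf h1m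
    simp only [pvStrip]
    split_ifs with h
    · have hd := (PySem.Int.mod_eq_zero_iff_dvd m p).1 h.2
      have hE : PySem.Int.floordiv m p = m / p :=
        PySem.Int.floordiv_eq_ediv_of_pos (by omega)
      obtain ⟨hmul, hq1, hqlt⟩ := pvDivFacts p m hp h.1 hd
      rw [hE]
      obtain ⟨a, ha, hr1, hrc⟩ := IH p hp (m / p) (by omega) hq1
      refine ⟨a + 1, ?_, hr1, hrc⟩
      conv_lhs => rw [← hmul, ha]
      ring
    · refine ⟨0, by ring, h1m, ?_⟩
      by_cases hm1 : m = 1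
      · exact Or.inl hm1
      · refine Or.inr (fun hdd => h ⟨by omega, ?_⟩)
        rw [PySem.Int.mod_eq_zero_iff_dvd]
        exact hdd

theorem pvStrip23_iff (f : ℕ) (m : Int) (h1 : 1 ≤ m) (hf : m.toNat < f) :
    (pvStrip f 3 (pvStrip f 2 m) = 1) ↔ pvSmooth m := by
  obtain ⟨a, ha, hr1, hrc1⟩ := pvStrip_spec f 2 (by norm_num) m hf h1
  set r1 := pvStrip f 2 m with hr1def
  have h2a : (1:ℤ) ≤ 2 ^ a := one_le_pow₀ (by norm_num)
  have hr1m : r1 ≤ m := by nlinarith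
  obtain ⟨b, hb, hr2, hrc2⟩ := pvStrip_spec f 3 (by norm_num) r1 (by omega) hr1
  set r2 := pvStrip f 3 r1 with hr2def
  constructor
  · intro h2
    rw [h2, mul_one] at hb
    exact ⟨a, b, by rw [ha, hb]⟩
  · rintro ⟨x, y, hxy⟩
    by_contra hne
    have hr2gt : 1 < r2 := by omega
    have h3b : (1:ℤ) ≤ 3 ^ b := one_le_pow₀ (by norm_num)
    have hr1gt : 1 < r1 := by nlinarith
    have hnd2r1 : ¬ 2 ∣ r1 := by
      rcases hrc1 with h' | h'
      · omega
      · exact h'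
    have hnd3 : ¬ 3 ∣ r2 := by
      rcases hrc2 with h' | h'
      · omega
      · exact h'
    have hr2dvdr1 : r2 ∣ r1 := ⟨3 ^ b, by rw [hb]; ring⟩
    have hnd2 : ¬ 2 ∣ r2 := fun hdd => hnd2r1 (hdd.trans hr2dvdr1)
    have hdvdm : r2 ∣ m := ⟨2 ^ a * 3 ^ b, by rw [ha, hb]; ring⟩
    have hr2N : ((r2.toNat : ℤ)) = r2 := Int.toNat_of_nonneg (by omega)
    have hmN : ((m.toNat : ℤ)) = m := Int.toNat_of_nonneg (by omega)
    have hdvdN : r2.toNat ∣ m.toNat := by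
      rw [← Int.natCast_dvd_natCast, hr2N, hmN]
      exact hdvdm
    have hmN2 : m.toNat = 2 ^ x * 3 ^ y := pvSmooth_toNat hxy
    have h2N : ¬ 2 ∣ r2.toNat := fun hh => hnd2 (by
      have := Int.natCast_dvd_natCast.mpr hh
      rwa [hr2N] at this)
    have h3N : ¬ 3 ∣ r2.toNat := fun hh => hnd3 (by
      have := Int.natCast_dvd_natCast.mpr hh
      rwa [hr2N] at this)
    have := pvCoprimeOne (hmN2 ▸ hdvdN) h2N h3N
    omega

-- ---- pvFactorLoop: the accumulator is purely appended to ----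
theorem pvFactorLoop_acc : ∀ (f : ℕ) (i n : Int) (acc : List Int),
    pvFactorLoop f i n acc = ((pvFactorLoop f i n []).1, acc ++ (pvFactorLoop f i n []).2) := by
  intro f
  induction f with
  | zero => intro i n acc; simp [pvFactorLoop]
  | succ f IH =>
    intro i n acc
    by_cases h1 : i * i ≤ n
    · by_cases h2 : PySem.Int.mod n i = 0
      · simp only [pvFactorLoop, if_pos h1, if_neg (not_not_intro h2)]
        rw [IH i (PySem.Int.floordiv n i) (acc ++ [i]),
          IH i (PySem.Int.floordiv n i) ([] ++ [i])]
        simp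
      · simp only [pvFactorLoop, if_pos h1, if_pos h2]
        exact IH (i + 1) n acc
    · simp only [pvFactorLoop, if_neg h1]
      simp

-- ---- A's factor list is all 2s and 3s iff n is 3-smooth ----
theorem pvFactor_smooth : ∀ (f : ℕ) (i n : Int), 2 ≤ i →
    (n + 1 - i).toNat + n.toNat < f → 1 ≤ n →
    (∀ j : Int, 2 ≤ j → j < i → ¬ j ∣ n) →
    ((((pvFactorLoop f i n []).2 ++
        (if 1 < (pvFactorLoop f i n []).1 then [(pvFactorLoop f i n []).1] else [])).all
      (fun f => f == 2 || f == 3)) = true ↔ pvSmooth n) := by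
  intro f
  induction f with
  | zero => intro i n _ hf; omega
  | succ f IH =>
    intro i n hi hf h1n hinv
    simp only [pvFactorLoop]
    by_cases h1 : i * i ≤ n
    · by_cases h2 : PySem.Int.mod n i = 0
      · -- divide branch
        rw [if_pos h1, if_neg (not_not_intro h2)]
        have hd := (PySem.Int.mod_eq_zero_iff_dvd n i).1 h2
        have hE : PySem.Int.floordiv n i = n / i :=
          PySem.Int.floordiv_eq_ediv_of_pos (by omega)
        obtain ⟨hmul, hq1, hqlt⟩ := pvDivFacts i n hi (by nlinarith) hd
        rw [hE, pvFactorLoop_acc f i (n / i) ([] ++ [i])]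
        have hinv' : ∀ j : Int, 2 ≤ j → j < i → ¬ j ∣ (n / i) := by
          intro j hj hji hjd
          have hqd : n / i ∣ n := ⟨i, by rw [mul_comm]; exact hmul.symm⟩
          exact hinv j hj hji (hjd.trans hqd)
        have hIH := IH i (n / i) hi (by set q := n / i; omega) hq1 hinv'
        simp only [List.nil_append, List.cons_append, List.all_cons, Bool.and_eq_true]
        rw [hIH]
        constructor
        · rintro ⟨hfi, a, b, hab⟩
          rcases (by simpa using hfi : i = 2 ∨ i = 3) with rfl | rfl
          · exact ⟨a + 1, b, by rw [← hmul, hab]; ring⟩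
          · exact ⟨a, b + 1, by rw [← hmul, hab]; ring⟩
        · rintro ⟨x, y, hxy⟩
          have hmN2 : n.toNat = 2 ^ x * 3 ^ y := pvSmooth_toNat hxy
          obtain ⟨p, hp23, hpd⟩ := pvSmallFactor (show 2 ≤ n.toNat by omega) hmN2
          have htn : ((n.toNat : ℤ)) = n := Int.toNat_of_nonneg (by omega)
          have hpdZ : (p : ℤ) ∣ n := by
            have := Int.natCast_dvd_natCast.mpr hpd
            rwa [htn] at this
          have hp2 : (2:ℤ) ≤ (p : ℤ) ∧ (p : ℤ) ≤ 3 := by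
            rcases hp23 with rfl | rfl <;> norm_num
          have hpi : i ≤ (p : ℤ) := by
            by_contra hlt
            exact hinv (p : ℤ) hp2.1 (by omega) hpdZ
          have hi3 : i ≤ 3 := le_trans hpi hp2.2
          have hfi : (i == 2 || i == 3) = true := by
            rcases (by omega : i = 2 ∨ i = 3) with rfl | rfl <;> simp
          refine ⟨hfi, ?_⟩
          rcases (by omega : i = 2 ∨ i = 3) with rfl | rfl
          · have hq0 : ((n / 2).toNat : ℤ) = n / 2 := Int.toNat_of_nonneg (by omega)
            have hNQ : n.toNat = 2 * (n / 2).toNat := by omega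
            have hx1 : 1 ≤ x := by
              by_contra hx0
              have hx0' : x = 0 := by omega
              rw [hx0', pow_zero, one_mul] at hmN2
              have hdv : (2:ℕ) ∣ 3 ^ y := by
                rw [← hmN2]; exact ⟨(n / 2).toNat, hNQ⟩
              have := Nat.Prime.dvd_of_dvd_pow Nat.prime_two hdv
              norm_num at this
            obtain ⟨x', rfl⟩ : ∃ x', x = x' + 1 := ⟨x - 1, by omega⟩
            have hsplitN : n.toNat = 2 * (2 ^ x' * 3 ^ y) := by rw [hmN2]; ring
            have hQ : (n / 2).toNat = 2 ^ x' * 3 ^ y := by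
              generalize hM : 2 ^ x' * 3 ^ y = M at hsplitN ⊢
              omega
            refine ⟨x', y, ?_⟩
            rw [← hq0, hQ]; push_cast; ring
          · have hq0 : ((n / 3).toNat : ℤ) = n / 3 := Int.toNat_of_nonneg (by omega)
            have hNQ : n.toNat = 3 * (n / 3).toNat := by omega
            have hy1 : 1 ≤ y := by
              by_contra hy0
              have hy0' : y = 0 := by omega
              rw [hy0', pow_zero, mul_one] at hmN2
              have hdv : (3:ℕ) ∣ 2 ^ x := by
                rw [← hmN2]; exact ⟨(n / 3).toNat, hNQ⟩
              have := Nat.Prime.dvd_of_dvd_pow Nat.prime_three hdv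
              norm_num at this
            obtain ⟨y', rfl⟩ : ∃ y', y = y' + 1 := ⟨y - 1, by omega⟩
            have hsplitN : n.toNat = 3 * (2 ^ x * 3 ^ y') := by rw [hmN2]; ring
            have hQ : (n / 3).toNat = 2 ^ x * 3 ^ y' := by
              generalize hM : 2 ^ x * 3 ^ y' = M at hsplitN ⊢
              omega
            refine ⟨x, y', ?_⟩
            rw [← hq0, hQ]; push_cast; ring
      · -- increment branch
        rw [if_pos h1, if_pos h2]
        have hnd : ¬ i ∣ n := fun hh => h2 ((PySem.Int.mod_eq_zero_iff_dvd n i).2 hh)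
        have h2i : 2 * i ≤ i * i := mul_le_mul_of_nonneg_right hi (by omega)
        have hinv' : ∀ j : Int, 2 ≤ j → j < i + 1 → ¬ j ∣ n := by
          intro j hj hji hjd
          rcases (by omega : j < i ∨ j = i) with hlt | rfl
          · exact hinv j hj hlt hjd
          · exact hnd hjd
        exact IH (i + 1) n (by omega) (by omega) h1n hinv'
    · -- exit branch
      rw [if_neg h1]
      by_cases hn1 : 1 < n
      · simp only [if_pos hn1, List.nil_append, List.all_cons, List.all_nil, Bool.and_true]
        constructor
        · intro hb
          rcases (by simpa using hb : n = 2 ∨ n = 3) with rfl | rfl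
          · exact ⟨1, 0, by norm_num⟩
          · exact ⟨0, 1, by norm_num⟩
        · rintro ⟨x, y, hxy⟩
          have hmN2 : n.toNat = 2 ^ x * 3 ^ y := pvSmooth_toNat hxy
          by_contra hb
          have hne : ¬ (n = 2 ∨ n = 3) := by simpa using hb
          have hn4 : 4 ≤ n := by omega
          obtain ⟨p, hp23, hpd⟩ := pvSmallFactor (show 2 ≤ n.toNat by omega) hmN2
          have htn : ((n.toNat : ℤ)) = n := Int.toNat_of_nonneg (by omega)
          have hpdZ : (p : ℤ) ∣ n := by
            have := Int.natCast_dvd_natCast.mpr hpd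
            rwa [htn] at this
          have hp2 : (2:ℤ) ≤ (p : ℤ) ∧ (p : ℤ) ≤ 3 := by
            rcases hp23 with rfl | rfl <;> norm_num
          have hpi : i ≤ (p : ℤ) := by
            by_contra hlt
            exact hinv (p : ℤ) hp2.1 (by omega) hpdZ
          have hi3 : i ≤ 3 := le_trans hpi hp2.2
          rcases (by omega : i = 2 ∨ i = 3) with rfl | rfl
          · omega
          · rcases hp23 with rfl | rfl
            · exact absurd hpi (by norm_num)
            · have h2n : ¬ (2:ℤ) ∣ n := hinv 2 (by norm_num) (by norm_num)
              have h3n : (3:ℤ) ∣ n := by exact_mod_cast hpdZ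
              omega
      · have hn : n = 1 := by omega
        subst hn
        exact ⟨fun _ => ⟨0, 0, by norm_num⟩, fun _ => by decide⟩

-- ===== VERDICT (by name: the statement is the Claim_ definition above) =====
theorem pierpont1_spec : Claim_equal_pierpont1 := by
  unfold Claim_equal_pierpont1
  intro number _
  unfold Spec_pierpont1
  rcases lt_or_ge number 2 with h | h
  · simp [pierpont1, pierpont1_alt, pvPrimeA_false h, h]
  · have hP := pvPrimeEq number h
    unfold pierpont1 pierpont1_alt
    rw [hP, if_neg (by omega : ¬ number < 2)]
    cases hB : pvIsPrimeLoop ((number - 1).toNat + 1) number 2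
    · rfl
    · have h1 : (1:ℤ) ≤ number - 1 := by omega
      have hinv0 : ∀ j : Int, 2 ≤ j → j < 2 → ¬ j ∣ (number - 1) := by
        intro j hj hj2; omega
      have hL := pvFactor_smooth ((number - 1 - 1).toNat + (number - 1).toNat + 1) 2
        (number - 1) le_rfl (by omega) h1 hinv0
      have hR := pvStrip23_iff ((number - 1).toNat + 1) (number - 1) h1 (by omega)
      have hsplit : pvFactor (number - 1) =
          (pvFactorLoop ((number - 1 - 1).toNat + (number - 1).toNat + 1) 2 (number - 1) []).2 ++
            (if 1 < (pvFactorLoop ((number - 1 - 1).toNat + (number - 1).toNat + 1) 2 (number - 1) []).1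
              then [(pvFactorLoop ((number - 1 - 1).toNat + (number - 1).toNat + 1) 2 (number - 1) []).1] else []) := by
        simp only [pvFactor]
        split_ifs <;> simp
      have hLR : (((pvFactorLoop ((number - 1 - 1).toNat + (number - 1).toNat + 1) 2 (number - 1) []).2 ++
            (if 1 < (pvFactorLoop ((number - 1 - 1).toNat + (number - 1).toNat + 1) 2 (number - 1) []).1
              then [(pvFactorLoop ((number - 1 - 1).toNat + (number - 1).toNat + 1) 2 (number - 1) []).1] else [])).all
          (fun i => i == 2 || i == 3)) =
          (pvStrip ((number - 1).toNat + 1) 3 (pvStrip ((number - 1).toNat + 1) 2 (number - 1)) == 1) := by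
        rw [Bool.eq_iff_iff, beq_iff_eq, hL, hR]
      rw [hsplit, hLR]
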